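-- pv_equiv track=rewrite | github.com/14chanwa/ProjectEuler | Python/problem209 - Circular Logic.py | get_table_row
-- ===== SOURCE A (Python) =====
-- def get_table_row(index):
--     """
--     Given the index of the row in a cannonically ordered truth table, returns corresponding the list of 6 booleans.
--     :param index: index of the row in an ordered truth table
--     :return: a list of 6 booleans
--     """
--     row = []
--     for i in range(0, 6):
--         if (index // 2**(6 - i - 1) ) % 2 == 0:
--             row.append(False)
--         else:
--             row.append(True)
--     return row
-- ===== SOURCE B (Python) =====
-- def get_table_row(index):
--     s = format(index % 64, '06b')
--     return [c == '1' for c in s]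
-- ===== Notes on version B (the rewrite author's own statement) =====
-- stated objective: idiomatic
-- what changed: Replaces the 6-step floordiv/mod loop by taking the low 6 bits once (index % 64), formatting them as a fixed-width binary string, and mapping each character to a boolean.
import Mathlib
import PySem

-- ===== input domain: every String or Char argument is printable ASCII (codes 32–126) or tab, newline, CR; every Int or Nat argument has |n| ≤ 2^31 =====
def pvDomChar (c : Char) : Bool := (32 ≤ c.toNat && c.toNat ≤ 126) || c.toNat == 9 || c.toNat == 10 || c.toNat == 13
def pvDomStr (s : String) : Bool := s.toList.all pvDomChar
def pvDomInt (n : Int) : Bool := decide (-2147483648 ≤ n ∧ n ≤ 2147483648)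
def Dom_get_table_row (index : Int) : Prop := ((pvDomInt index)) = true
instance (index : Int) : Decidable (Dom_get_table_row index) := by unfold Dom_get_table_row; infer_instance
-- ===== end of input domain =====

-- B replaces A's 6-step floordiv/mod loop by formatting the low 6 bits (index % 64) as a
-- zero-padded binary string and mapping its characters to booleans (idiomatic, same cost).

-- ===== PORT A =====
def get_table_row (index : Int) : List Bool :=
  (PySem.List.pyRange 0 6 1).foldl (fun row i =>
    if PySem.Int.mod (PySem.Int.floordiv index ((2 : Int) ^ (6 - i - 1).toNat)) 2 == 0 then
      row ++ [false]
    else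
      row ++ [true]) []

-- ===== PORT B =====
def get_table_row_alt (index : Int) : List Bool :=
  -- s = format(index % 64, '06b'): binary digits (Nat.toDigits 2, exact for format(·,'b') on
  -- nonnegative input; index % 64 is nonnegative), zero-padded on the left to width 6
  let m := (PySem.Int.mod index 64).toNat
  let s := List.replicate (6 - (Nat.toDigits 2 m).length) '0' ++ Nat.toDigits 2 m
  s.map (fun c => c == '1')

-- ===== PRECONDITION & SPEC =====
def Spec_get_table_row (index : Int) (out : List Bool) : Prop := out = get_table_row_alt index
instance (index : Int) (out : List Bool) : Decidable (Spec_get_table_row index out) := by unfold Spec_get_table_row; infer_instance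

-- ===== CLAIM (what is proved, stated in full; the proofs are below) =====
def Claim_equal_get_table_row : Prop := ∀ (index : Int), Dom_get_table_row index → Spec_get_table_row index (get_table_row index)

-- ===== LEMMAS AND PROOFS =====

-- each loop-body condition of A depends on index only through index % 64
lemma pv_key (index d : Int) (h0 : 0 < d) (hdvd : d ∣ 32) :
    PySem.Int.mod (PySem.Int.floordiv index d) 2
      = PySem.Int.mod (PySem.Int.floordiv (index % 64) d) 2 := by
  obtain ⟨e, he⟩ := hdvd
  rw [PySem.Int.floordiv_eq_ediv_of_pos h0, PySem.Int.floordiv_eq_ediv_of_pos h0,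
      PySem.Int.mod_eq_emod_of_pos (by omega : (0:Int) < 2),
      PySem.Int.mod_eq_emod_of_pos (by omega : (0:Int) < 2)]
  conv_lhs => rw [show index = index % 64 + (index / 64 * (2 * e)) * d from by
    linear_combination 2 * (index / 64) * he - Int.emod_add_mul_ediv index 64]
  rw [Int.add_mul_ediv_right _ _ (by omega : d ≠ 0),
      show index / 64 * (2 * e) = 2 * (index / 64 * e) from by ring,
      Int.add_mul_emod_self_left]

lemma pv_A_periodic (index : Int) : get_table_row index = get_table_row (index % 64) := by
  unfold get_table_row
  apply PySem.List.foldl_congr_mem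
  intro row i hi
  rw [pv_key index ((2 : Int) ^ (6 - i - 1).toNat) (by positivity) ?_]
  have hi' := PySem.List.mem_pyRange_one.mp hi
  have h5 : (6 - i - 1).toNat ≤ 5 := by omega
  interval_cases h : (6 - i - 1).toNat <;> norm_num [h]

lemma pv_alt_periodic (index : Int) :
    get_table_row_alt index = get_table_row_alt (index % 64) := by
  simp only [get_table_row_alt]
  rw [PySem.Int.mod_eq_emod_of_pos (by omega : (0:Int) < 64),
      PySem.Int.mod_eq_emod_of_pos (by omega : (0:Int) < 64),
      Int.emod_emod_of_dvd _ (by norm_num)]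

lemma pv_small : ∀ n : Fin 64, get_table_row (n.val : Int) = get_table_row_alt (n.val : Int) := by
  decide

lemma pv_eq_all (index : Int) : get_table_row index = get_table_row_alt index := by
  have h0 : 0 ≤ index % 64 := Int.emod_nonneg _ (by omega)
  have h1 : index % 64 < 64 := Int.emod_lt_of_pos _ (by omega)
  have hs := pv_small ⟨(index % 64).toNat, by omega⟩
  simp only [Int.toNat_of_nonneg h0] at hs
  rw [pv_A_periodic, pv_alt_periodic, hs]

-- ===== VERDICT (by name: the statement is the Claim_ definition above) =====
theorem get_table_row_spec : Claim_equal_get_table_row := by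
  intro index _
  unfold Spec_get_table_row
  exact pv_eq_all index
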